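-- pv_equiv track=rewrite | github.com/IanYHWu/rc | training/projects/reasoning_cache/utils/parsing_utils.py | count_tokens_between_ids
-- ===== SOURCE A (Python) =====
-- from typing import Union, List
--
-- def count_tokens_between_ids(
--     response_tokens: List[List[int]],
--     open_id: int,
--     close_id: int,
-- ) -> List[int]:
--     """
--     Count thinking tokens for a batch of tokenized responses.
--     """
--     thinking_counts = []
--     for tokens in response_tokens:
--         thinking_token_count = 0
--         i = 0
--         while i < len(tokens):
--             if tokens[i] == open_id:
--                 i += 1
--                 start_pos = i
--                 while i < len(tokens) and tokens[i] != close_id: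
--                     i += 1
--                 if i < len(tokens) and tokens[i] == close_id:
--                     thinking_token_count += i - start_pos
--                     i += 1
--                 else:
--                     thinking_token_count += len(tokens) - start_pos
--                     break
--             else:
--                 i += 1
--         thinking_counts.append(thinking_token_count)
--     return thinking_counts
-- ===== SOURCE B (Python) =====
-- from typing import List
--
-- def count_tokens_between_ids(
--     response_tokens: List[List[int]],
--     open_id: int,
--     close_id: int,
-- ) -> List[int]:
--     counts = []
--     for tokens in response_tokens:
--         inside = False
--         count = 0
--         for tok in tokens:
--             if tok == open_id and not inside:
--                 inside = True
--             elif tok == close_id and inside: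
--                 inside = False
--             elif inside:
--                 count += 1
--         counts.append(count)
--     return counts
-- ===== Notes on version B (the rewrite author's own statement) =====
-- stated objective: simpler
-- what changed: Replaced the nested while loops with manual index arithmetic by a single flat for-loop state machine over each token list, maintaining a boolean inside-flag and a running count.
import Mathlib
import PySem

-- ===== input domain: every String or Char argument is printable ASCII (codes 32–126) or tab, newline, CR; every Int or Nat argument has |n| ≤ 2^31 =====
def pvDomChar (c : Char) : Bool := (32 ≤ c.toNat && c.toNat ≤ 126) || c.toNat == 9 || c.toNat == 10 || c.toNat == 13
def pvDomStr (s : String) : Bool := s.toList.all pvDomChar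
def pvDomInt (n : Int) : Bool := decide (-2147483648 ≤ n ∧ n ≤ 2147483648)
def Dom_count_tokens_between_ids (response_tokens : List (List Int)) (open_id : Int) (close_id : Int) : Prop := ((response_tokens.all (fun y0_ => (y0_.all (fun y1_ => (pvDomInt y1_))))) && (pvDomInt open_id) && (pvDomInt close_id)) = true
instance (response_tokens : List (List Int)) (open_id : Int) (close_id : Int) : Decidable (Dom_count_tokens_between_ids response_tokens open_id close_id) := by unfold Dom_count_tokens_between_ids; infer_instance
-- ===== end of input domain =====

-- B replaces A's nested while loops and index arithmetic by one flat inside-flag state machine per list (simpler decomposition, same cost).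

-- ===== PORT A =====
-- inner while: advance i while i < len(tokens) and tokens[i] != close_id; returns the final i
def aInner (tokens : List Int) (close_id : Int) (i : Nat) : Nat :=
  if h : i < tokens.length then
    if tokens[i] ≠ close_id then aInner tokens close_id (i + 1) else i
  else i
termination_by tokens.length - i

-- outer while over index i with accumulator thinking_token_count
theorem aInner_ge (tokens : List Int) (close_id : Int) (i : Nat) : i ≤ aInner tokens close_id i := by
  unfold aInner
  split
  next h =>
    split
    next =>
      have ih := aInner_ge tokens close_id (i + 1)
      omega
    next => omega
  next => omega
termination_by tokens.length - i

def aOuter (tokens : List Int) (open_id close_id : Int) (i : Nat) (count : Int) : Int :=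
  if h : i < tokens.length then
    if tokens[i] = open_id then
      let start := i + 1
      let j := aInner tokens close_id start
      if j < tokens.length then
        -- tokens[j] == close_id: count the span, continue after it
        aOuter tokens open_id close_id (j + 1) (count + ((j : Int) - (start : Int)))
      else
        -- no close found: count to the end and break
        count + ((tokens.length : Int) - (start : Int))
    else aOuter tokens open_id close_id (i + 1) count
  else count
termination_by tokens.length - i
decreasing_by
  · have := aInner_ge tokens close_id (i + 1)
    omega
  · omega

def count_tokens_between_ids (response_tokens : List (List Int)) (open_id : Int) (close_id : Int) : List Int :=
  response_tokens.map (fun tokens => aOuter tokens open_id close_id 0 0)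

-- ===== PORT B =====
def stepB (open_id close_id : Int) (st : Bool × Int) (tok : Int) : Bool × Int :=
  if tok = open_id ∧ st.1 = false then (true, st.2)
  else if tok = close_id ∧ st.1 = true then (false, st.2)
  else if st.1 = true then (st.1, st.2 + 1)
  else st

def count_tokens_between_ids_alt (response_tokens : List (List Int)) (open_id : Int) (close_id : Int) : List Int :=
  response_tokens.map (fun tokens => (tokens.foldl (stepB open_id close_id) (false, 0)).2)

-- ===== PRECONDITION & SPEC =====
def Spec_count_tokens_between_ids (response_tokens : List (List Int)) (open_id : Int) (close_id : Int) (out : List Int) : Prop := out = count_tokens_between_ids_alt response_tokens open_id close_id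
instance (response_tokens : List (List Int)) (open_id : Int) (close_id : Int) (out : List Int) : Decidable (Spec_count_tokens_between_ids response_tokens open_id close_id out) := by unfold Spec_count_tokens_between_ids; infer_instance

-- ===== CLAIM (what is proved, stated in full; the proofs are below) =====
def Claim_equal_count_tokens_between_ids : Prop := ∀ (response_tokens : List (List Int)) (open_id : Int) (close_id : Int), Dom_count_tokens_between_ids response_tokens open_id close_id → Spec_count_tokens_between_ids response_tokens open_id close_id (count_tokens_between_ids response_tokens open_id close_id)

-- ===== LEMMAS AND PROOFS =====

theorem foldB_inside (tokens : List Int) (open_id close_id : Int) (i : Nat) (count : Int)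
    (hi : i ≤ tokens.length) :
    ((tokens.drop i).foldl (stepB open_id close_id) (true, count)).2 =
      if aInner tokens close_id i < tokens.length
      then ((tokens.drop (aInner tokens close_id i + 1)).foldl (stepB open_id close_id)
              (false, count + ((aInner tokens close_id i : Int) - (i : Int)))).2
      else count + ((tokens.length : Int) - (i : Int)) := by
  by_cases h : i < tokens.length
  · rw [List.drop_eq_getElem_cons h]
    by_cases hc : tokens[i] = close_id
    · have hj : aInner tokens close_id i = i := by
        rw [aInner]; simp [h, hc]
      rw [hj]
      simp only [h, if_pos]
      have hs : stepB open_id close_id (true, count) tokens[i] = (false, count) := by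
        simp [stepB, hc]
      have hacc : count + ((i : Int) - (i : Int)) = count := by ring
      rw [List.foldl_cons, hs, hacc]
    · have hj : aInner tokens close_id i = aInner tokens close_id (i + 1) := by
        rw [aInner]; simp [h, hc]
      have hs : stepB open_id close_id (true, count) tokens[i] = (true, count + 1) := by
        simp [stepB, hc]
      rw [List.foldl_cons, hs, foldB_inside tokens open_id close_id (i + 1) (count + 1) (by omega), hj]
      by_cases hlt : aInner tokens close_id (i + 1) < tokens.length
      · simp only [hlt, if_pos]
        have hacc : count + 1 + ((aInner tokens close_id (i + 1) : Int) - ((i + 1 : Nat) : Int))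
            = count + ((aInner tokens close_id (i + 1) : Int) - (i : Int)) := by
          push_cast; ring
        rw [hacc]
      · simp only [hlt, if_false]
        push_cast; ring
  · have hie : i = tokens.length := by omega
    have hj : aInner tokens close_id i = i := by
      rw [aInner]; simp [h]
    rw [hj, List.drop_eq_nil_of_le (by omega)]
    simp [hie]
termination_by tokens.length - i

theorem foldB_outside (tokens : List Int) (open_id close_id : Int) (i : Nat) (count : Int) :
    ((tokens.drop i).foldl (stepB open_id close_id) (false, count)).2 =
      aOuter tokens open_id close_id i count := by
  by_cases h : i < tokens.length
  · rw [List.drop_eq_getElem_cons h]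
    by_cases ho : tokens[i] = open_id
    · have hs : stepB open_id close_id (false, count) tokens[i] = (true, count) := by
        simp [stepB, ho]
      rw [List.foldl_cons, hs, foldB_inside tokens open_id close_id (i + 1) count (by omega)]
      rw [aOuter]
      simp only [h, dif_pos, ho, if_pos]
      have hge := aInner_ge tokens close_id (i + 1)
      by_cases hlt : aInner tokens close_id (i + 1) < tokens.length
      · simp only [hlt, if_pos]
        rw [foldB_outside tokens open_id close_id (aInner tokens close_id (i + 1) + 1)
              (count + ((aInner tokens close_id (i + 1) : Int) - ((i + 1 : Nat) : Int)))]
      · simp only [hlt, if_false]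
    · have hs : stepB open_id close_id (false, count) tokens[i] = (false, count) := by
        simp [stepB, ho]
      rw [List.foldl_cons, hs, foldB_outside tokens open_id close_id (i + 1) count]
      conv_rhs => rw [aOuter]
      simp [h, ho]
  · rw [List.drop_eq_nil_of_le (by omega), aOuter]; simp [h]
termination_by tokens.length - i
decreasing_by
  · have hge := aInner_ge tokens close_id (i + 1)
    omega
  · omega

-- ===== VERDICT (by name: the statement is the Claim_ definition above) =====
theorem count_tokens_between_ids_spec : Claim_equal_count_tokens_between_ids := by
  intro response_tokens open_id close_id _
  unfold Spec_count_tokens_between_ids count_tokens_between_ids count_tokens_between_ids_alt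
  refine List.map_congr_left (fun tokens _ => ?_)
  have := foldB_outside tokens open_id close_id 0 0
  simpa using this.symm
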